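-- pv_equiv track=rewrite | github.com/HoGyeongC/Baekjoon | 프로그래머스/1/42840. 모의고사/모의고사.py | solution
-- ===== SOURCE A (Python) =====
-- def solution(answers):
--     answer = []
--     p1 = [1,2,3,4,5]
--     p2 = [2,1,2,3,2,4,2,5]
--     p3 = [3,3,1,1,2,2,4,4,5,5]
--
--     cntp1 = 0
--     cntp2 = 0
--     cntp3 = 0
--
--     for i in range(len(answers)):
--         if answers[i] == p1[i % len(p1)]:
--             cntp1 += 1
--         if answers[i] == p2[i % len(p2)]:
--             cntp2 += 1
--         if answers[i] == p3[i % len(p3)]: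
--             cntp3 += 1
--
--     if max(cntp1,cntp2,cntp3) == cntp1:
--         answer.append(1)
--     if max(cntp1,cntp2,cntp3) == cntp2:
--         answer.append(2)
--     if max(cntp1,cntp2,cntp3) == cntp3:
--         answer.append(3)
--
--
--     return answer
-- ===== SOURCE B (Python) =====
-- def solution(answers):
--     patterns = [[1, 2, 3, 4, 5],
--                 [2, 1, 2, 3, 2, 4, 2, 5],
--                 [3, 3, 1, 1, 2, 2, 4, 4, 5, 5]]
--
--     def score(p):
--         # blocked traversal: cut the answers into pattern-sized chunks and
--         # align each chunk with the pattern directly via zip (no modulo indexing)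
--         total = 0
--         for start in range(0, len(answers), len(p)):
--             block = answers[start:start + len(p)]
--             total += sum(1 for a, b in zip(block, p) if a == b)
--         return total
--
--     scores = [score(p) for p in patterns]
--     best = max(scores)
--     return [i + 1 for i, s in enumerate(scores) if s == best]
-- ===== Notes on version B (the rewrite author's own statement) =====
-- stated objective: alternative
-- what changed: Replaces A's single indexed pass that compares each answer against p[i % len(p)] while updating three named counters with a blocked traversal: the answer list is cut into pattern-sized chunks and each chunk is zipped directly against the pattern (no modulo indexing anywhere), one such pass per pattern, then the best indices are gathered from the score list.
import Mathlib
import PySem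

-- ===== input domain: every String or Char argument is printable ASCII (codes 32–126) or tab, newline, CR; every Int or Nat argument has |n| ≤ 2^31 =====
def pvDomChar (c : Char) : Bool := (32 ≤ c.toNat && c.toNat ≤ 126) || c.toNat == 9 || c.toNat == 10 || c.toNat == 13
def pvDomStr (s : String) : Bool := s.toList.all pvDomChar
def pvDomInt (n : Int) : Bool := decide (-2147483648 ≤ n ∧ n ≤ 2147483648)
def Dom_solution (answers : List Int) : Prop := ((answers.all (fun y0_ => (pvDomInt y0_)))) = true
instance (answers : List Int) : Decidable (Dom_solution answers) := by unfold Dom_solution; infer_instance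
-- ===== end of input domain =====

-- B replaces A's single indexed pass (compare answers[i] with p[i % len(p)], three counters) by a
-- blocked traversal: the answers are cut into pattern-sized chunks, each chunk zipped directly
-- against the pattern (no modulo indexing), one pass per pattern; same cost, same results.

-- ===== PORT A =====
def solution (answers : List Int) : List Int :=
  let answer : List Int := []
  let p1 : List Int := [1, 2, 3, 4, 5]
  let p2 : List Int := [2, 1, 2, 3, 2, 4, 2, 5]
  let p3 : List Int := [3, 3, 1, 1, 2, 2, 4, 4, 5, 5]
  -- for i in range(len(answers)): three independent counter updates in one pass
  let cnt := (PySem.List.pyRange 0 (answers.length : Int) 1).foldl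
    (fun (c : Int × Int × Int) i =>
      ( if PySem.List.pyGetD answers i 0 = PySem.List.pyGetD p1 (PySem.Int.mod i (p1.length : Int)) 0 then c.1 + 1 else c.1,
        if PySem.List.pyGetD answers i 0 = PySem.List.pyGetD p2 (PySem.Int.mod i (p2.length : Int)) 0 then c.2.1 + 1 else c.2.1,
        if PySem.List.pyGetD answers i 0 = PySem.List.pyGetD p3 (PySem.Int.mod i (p3.length : Int)) 0 then c.2.2 + 1 else c.2.2))
    (0, 0, 0)
  let cntp1 := cnt.1
  let cntp2 := cnt.2.1
  let cntp3 := cnt.2.2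
  let answer := if max cntp1 (max cntp2 cntp3) = cntp1 then answer ++ [1] else answer
  let answer := if max cntp1 (max cntp2 cntp3) = cntp2 then answer ++ [2] else answer
  let answer := if max cntp1 (max cntp2 cntp3) = cntp3 then answer ++ [3] else answer
  answer

-- ===== PORT B =====
-- B's patterns list
def pvPatterns : List (List Int) :=
  [[1, 2, 3, 4, 5], [2, 1, 2, 3, 2, 4, 2, 5], [3, 3, 1, 1, 2, 2, 4, 4, 5, 5]]

-- sum(1 for a, b in zip(block, p) if a == b)
def pvZipMatches (block p : List Int) : Int :=
  ((block.zip p).map (fun ab => if ab.1 = ab.2 then (1 : Int) else 0)).sum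

-- B's blocked loop: for start in range(0, len(answers), len(p)): total += zip-matches of the
-- chunk answers[start:start+len(p)] against p
def pvScoreBlocks (answers p : List Int) : Int :=
  (PySem.List.pyRange 0 (answers.length : Int) (p.length : Int)).foldl
    (fun total start =>
      total + pvZipMatches (PySem.List.slice answers (some start) (some (start + (p.length : Int)))) p)
    0

def solution_alt (answers : List Int) : List Int :=
  let scores := pvPatterns.map (fun p => pvScoreBlocks answers p)
  let best := (PySem.List.max? scores (fun s => s)).getD 0
  (PySem.List.enumerate scores).filterMap
    (fun x => if x.2 = best then some (x.1 + 1) else none)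

-- ===== PRECONDITION & SPEC =====
def Spec_solution (answers : List Int) (out : List Int) : Prop := out = solution_alt answers
instance (answers : List Int) (out : List Int) : Decidable (Spec_solution answers out) := by unfold Spec_solution; infer_instance

-- ===== CLAIM (what is proved, stated in full; the proofs are below) =====
def Claim_equal_solution : Prop := ∀ (answers : List Int), Dom_solution answers → Spec_solution answers (solution answers)

-- ===== LEMMAS AND PROOFS =====

-- Proof-side bridge: count matches of xs against the cyclic pattern p, consuming the current
-- rotation q one element at a time and refilling from p when it runs out.
def rotCnt : List Int → List Int → List Int → Int
  | [], _, _ => 0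
  | x :: xs, y :: q, p => (if x = y then 1 else 0) + rotCnt xs q p
  | x :: xs, [], p =>
      match p with
      | [] => 0
      | y :: q => (if x = y then 1 else 0) + rotCnt xs q p
  termination_by xs _ _ => xs.length

theorem rotCnt_cons_cons (x y : Int) (xs q p : List Int) :
    rotCnt (x :: xs) (y :: q) p = (if x = y then 1 else 0) + rotCnt xs q p := by
  simp [rotCnt]

theorem rotCnt_refill (xs p : List Int) : rotCnt xs [] p = rotCnt xs p p := by
  cases xs <;> cases p <;> simp [rotCnt]

-- A's per-index indicator sum, with an arbitrary start index s
def indSum (answers p : List Int) (s : Int) : Int :=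
  ((PySem.List.enumerate answers s).map
    (fun x => if x.2 = PySem.List.pyGetD p (PySem.Int.mod x.1 (p.length : Int)) 0 then (1 : Int) else 0)).sum

theorem succ_mod_cases (s L : Nat) (hL : 0 < L) :
    (s + 1) % L = if s % L + 1 = L then 0 else s % L + 1 := by
  have h := Nat.div_add_mod s L
  split_ifs with h1
  · have : s + 1 = L * (s / L + 1) := by rw [Nat.mul_succ]; omega
    rw [this, Nat.mul_mod_right]
  · have hlt : s % L < L := Nat.mod_lt _ hL
    have : s + 1 = L * (s / L) + (s % L + 1) := by omega
    rw [this, Nat.mul_add_mod]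
    exact Nat.mod_eq_of_lt (by omega)

theorem indSum_eq_rotCnt (p : List Int) (hp : p ≠ []) :
    ∀ (xs : List Int) (s : Nat),
      indSum xs p (s : Int) = rotCnt xs (p.drop (s % p.length)) p := by
  intro xs
  induction xs with
  | nil => intro s; simp [indSum, rotCnt, PySem.List.enumerate]
  | cons x xs ih =>
    intro s
    have hL : 0 < p.length := List.length_pos_iff.mpr hp
    have hsl : s % p.length < p.length := Nat.mod_lt _ hL
    have hdrop : p.drop (s % p.length) = p[s % p.length] :: p.drop (s % p.length + 1) :=
      List.drop_eq_getElem_cons hsl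
    have hmod : PySem.Int.mod (s : Int) (p.length : Int) = ((s % p.length : Nat) : Int) :=
      PySem.Int.mod_natCast s p.length
    have hget : PySem.List.pyGetD p (((s % p.length : Nat)) : Int) 0 = p[s % p.length] := by
      rw [PySem.List.pyGetD_natCast, List.getD_eq_getElem p 0 hsl]
    have hcast : ((s : Int) + 1) = ((s + 1 : Nat) : Int) := by push_cast; ring
    have htail : rotCnt xs (p.drop (s % p.length + 1)) p
        = rotCnt xs (p.drop ((s + 1) % p.length)) p := by
      rw [succ_mod_cases s p.length hL]
      split_ifs with h1
      · rw [h1, List.drop_length, List.drop_zero, rotCnt_refill]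
      · rfl
    calc indSum (x :: xs) p (s : Int)
        = (if x = PySem.List.pyGetD p (PySem.Int.mod (s : Int) (p.length : Int)) 0 then (1:Int) else 0)
            + indSum xs p ((s : Int) + 1) := by
          simp [indSum, PySem.List.enumerate]
      _ = (if x = p[s % p.length] then (1:Int) else 0)
            + rotCnt xs (p.drop (s % p.length + 1)) p := by
          rw [hmod, hget, hcast, ih (s + 1), htail]
      _ = rotCnt (x :: xs) (p.drop (s % p.length)) p := by
          rw [hdrop, rotCnt_cons_cons]

-- consuming one full rotation q is exactly one chunk of zip-matches
theorem rotCnt_chunk (p : List Int) :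
    ∀ (q xs : List Int),
      rotCnt xs q p = pvZipMatches (xs.take q.length) q + rotCnt (xs.drop q.length) [] p := by
  intro q
  induction q with
  | nil => intro xs; simp [pvZipMatches]
  | cons y q ih =>
    intro xs
    cases xs with
    | nil => simp [rotCnt, pvZipMatches]
    | cons x xs =>
      simp only [List.length_cons, List.take_succ_cons, List.drop_succ_cons]
      have : rotCnt (x :: xs) (y :: q) p = (if x = y then (1:Int) else 0) + rotCnt xs q p := by
        simp [rotCnt]
      rw [this, ih xs]
      simp [pvZipMatches]
      ring

theorem pyRange_pos_nil (a b s : Int) (hs : 0 < s) (h : b ≤ a) :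
    PySem.List.pyRange a b s = [] := by
  rw [PySem.List.pyRange_of_pos a b hs, if_neg (by omega)]
  simp

theorem pyRange_pos_cons (a b s : Int) (hs : 0 < s) (hab : a < b) :
    PySem.List.pyRange a b s = a :: PySem.List.pyRange (a + s) b s := by
  rw [PySem.List.pyRange_of_pos a b hs, PySem.List.pyRange_of_pos (a + s) b hs]
  have key : b - a + s - 1 = (b - a - 1) + 1 * s := by ring
  rw [if_pos hab, key, Int.add_mul_ediv_right _ _ (by omega : s ≠ 0)]
  have h3 : 0 ≤ (b - a - 1) / s := Int.ediv_nonneg (by omega) (by omega)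
  have h4 : ((b - a - 1) / s + 1).toNat = ((b - a - 1) / s).toNat + 1 := by omega
  have e : b - (a + s) + s - 1 = b - a - 1 := by ring
  rw [h4, List.range_succ_eq_map, List.map_cons, List.map_map]
  by_cases h2 : a + s < b
  · rw [if_pos h2, e]
    refine List.cons_eq_cons.mpr ⟨by norm_num, List.map_congr_left ?_⟩
    intro k _
    simp only [Function.comp_apply]
    push_cast
    ring
  · rw [if_neg h2]
    have h0 : (b - a - 1) / s = 0 := Int.ediv_eq_zero_of_lt (by omega) (by omega)
    simp [h0]

-- B's blocked foldl over start indices computes the cyclic match count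
theorem blocks_eq (p : List Int) (hp : p ≠ []) (full : List Int) :
    ∀ (k off : Nat) (acc : Int), full.length - off ≤ k →
      (PySem.List.pyRange (off : Int) (full.length : Int) (p.length : Int)).foldl
        (fun t st =>
          t + pvZipMatches (PySem.List.slice full (some st) (some (st + (p.length : Int)))) p)
        acc
      = acc + rotCnt (full.drop off) p p := by
  intro k
  have hL : 0 < p.length := List.length_pos_iff.mpr hp
  induction k with
  | zero =>
    intro off acc hk
    have hle : full.length ≤ off := by omega
    rw [pyRange_pos_nil _ _ _ (by exact_mod_cast hL) (by exact_mod_cast hle),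
      List.drop_eq_nil_of_le hle]
    simp [rotCnt]
  | succ k ih =>
    intro off acc hk
    by_cases hoff : full.length ≤ off
    · rw [pyRange_pos_nil _ _ _ (by exact_mod_cast hL) (by exact_mod_cast hoff),
        List.drop_eq_nil_of_le hoff]
      simp [rotCnt]
    · have hlt : off < full.length := by omega
      rw [pyRange_pos_cons _ _ _ (by exact_mod_cast hL) (by exact_mod_cast hlt)]
      rw [List.foldl_cons, PySem.List.slice_natCast_add]
      have hcast : (off : Int) + (p.length : Int) = ((off + p.length : Nat) : Int) := by
        push_cast; ring
      rw [hcast, ih (off + p.length) _ (by omega)]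
      have hrhs : rotCnt (full.drop off) p p
          = pvZipMatches ((full.drop off).take p.length) p
            + rotCnt (full.drop (off + p.length)) p p := by
        rw [rotCnt_chunk p p (full.drop off), rotCnt_refill, List.drop_drop]
      rw [hrhs]
      omega

theorem score_eq (answers p : List Int) (hp : p ≠ []) :
    pvScoreBlocks answers p = indSum answers p 0 := by
  have h0 : (0 : Int) = ((0 : Nat) : Int) := rfl
  rw [pvScoreBlocks, h0, blocks_eq p hp answers answers.length 0 ((0 : Nat) : Int) (by omega),
    indSum_eq_rotCnt p hp answers 0, Nat.zero_mod, List.drop_zero, List.drop_zero]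
  omega

-- A's foldl counter for one pattern equals the indicator sum
theorem count_eq_indSum (answers p : List Int) :
    (PySem.List.pyRange 0 (answers.length : Int) 1).foldl
      (fun (c : Int) i =>
        if PySem.List.pyGetD answers i 0 = PySem.List.pyGetD p (PySem.Int.mod i (p.length : Int)) 0
        then c + 1 else c) 0
    = indSum answers p 0 := by
  rw [indSum, PySem.List.enumerate_eq_map_pyRange (d := 0), List.map_map,
    PySem.List.foldl_ite_add_one]
  rw [← PySem.List.sum_map_ite_one_zero
    (p := fun j => decide (PySem.List.pyGetD answers j 0 = PySem.List.pyGetD p (PySem.Int.mod j (p.length : Int)) 0))]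
  simp [PySem.List.len, Function.comp_def]

-- A's one pass with three independent counters is three per-pattern passes
theorem fold3_eq (answers : List Int) :
    (PySem.List.pyRange 0 (answers.length : Int) 1).foldl
      (fun (c : Int × Int × Int) i =>
        ( if PySem.List.pyGetD answers i 0 = PySem.List.pyGetD ([1,2,3,4,5] : List Int) (PySem.Int.mod i (([1,2,3,4,5] : List Int).length : Int)) 0 then c.1 + 1 else c.1,
          if PySem.List.pyGetD answers i 0 = PySem.List.pyGetD ([2,1,2,3,2,4,2,5] : List Int) (PySem.Int.mod i (([2,1,2,3,2,4,2,5] : List Int).length : Int)) 0 then c.2.1 + 1 else c.2.1,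
          if PySem.List.pyGetD answers i 0 = PySem.List.pyGetD ([3,3,1,1,2,2,4,4,5,5] : List Int) (PySem.Int.mod i (([3,3,1,1,2,2,4,4,5,5] : List Int).length : Int)) 0 then c.2.2 + 1 else c.2.2))
      (0, 0, 0)
    = (indSum answers [1,2,3,4,5] 0, indSum answers [2,1,2,3,2,4,2,5] 0, indSum answers [3,3,1,1,2,2,4,4,5,5] 0) := by
  rw [PySem.List.foldl_prod_mk
    (f := fun (c : Int) i => if PySem.List.pyGetD answers i 0 = PySem.List.pyGetD ([1,2,3,4,5] : List Int) (PySem.Int.mod i (([1,2,3,4,5] : List Int).length : Int)) 0 then c + 1 else c)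
    (g := fun (c : Int × Int) i =>
      ( if PySem.List.pyGetD answers i 0 = PySem.List.pyGetD ([2,1,2,3,2,4,2,5] : List Int) (PySem.Int.mod i (([2,1,2,3,2,4,2,5] : List Int).length : Int)) 0 then c.1 + 1 else c.1,
        if PySem.List.pyGetD answers i 0 = PySem.List.pyGetD ([3,3,1,1,2,2,4,4,5,5] : List Int) (PySem.Int.mod i (([3,3,1,1,2,2,4,4,5,5] : List Int).length : Int)) 0 then c.2 + 1 else c.2))]
  rw [PySem.List.foldl_prod_mk
    (f := fun (c : Int) i => if PySem.List.pyGetD answers i 0 = PySem.List.pyGetD ([2,1,2,3,2,4,2,5] : List Int) (PySem.Int.mod i (([2,1,2,3,2,4,2,5] : List Int).length : Int)) 0 then c + 1 else c)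
    (g := fun (c : Int) i => if PySem.List.pyGetD answers i 0 = PySem.List.pyGetD ([3,3,1,1,2,2,4,4,5,5] : List Int) (PySem.Int.mod i (([3,3,1,1,2,2,4,4,5,5] : List Int).length : Int)) 0 then c + 1 else c)]
  rw [count_eq_indSum, count_eq_indSum, count_eq_indSum]

theorem solution_eq_alt (answers : List Int) : solution answers = solution_alt answers := by
  simp only [solution, solution_alt, pvPatterns, fold3_eq, List.map_cons, List.map_nil]
  simp only [score_eq answers [1,2,3,4,5] (by simp), score_eq answers [2,1,2,3,2,4,2,5] (by simp),
    score_eq answers [3,3,1,1,2,2,4,4,5,5] (by simp)]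
  simp only [PySem.List.max?_id_cons, Option.getD_some, List.foldl,
    PySem.List.enumerate, List.filterMap]
  set a := indSum answers [1,2,3,4,5] 0 with ha
  set b := indSum answers [2,1,2,3,2,4,2,5] 0 with hb
  set c := indSum answers [3,3,1,1,2,2,4,4,5,5] 0 with hc
  split_ifs <;> first | rfl | (exfalso; omega)

-- ===== VERDICT (by name: the statement is the Claim_ definition above) =====
theorem solution_spec : Claim_equal_solution := by
  intro answers _
  unfold Spec_solution
  exact solution_eq_alt answers
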